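-- pv_equiv track=rewrite | github.com/jteruya/ddtools | analysis/entity_attribute_vectors.py | create_entity_attribute_vectors
-- ===== SOURCE A (Python) =====
-- def create_entity_attribute_vectors(entity_list,entity_attribute_list):
--
--   entity_attribute_vectors = []
--   for entity in entity_list:
--     attribute_vector = []
--     for entity_attribute in entity_attribute_list:
--       entityid = entity_attribute[0]
--       attribute = entity_attribute[1]
--       flag = entity_attribute[2]
--       if entity == entityid:
--         attribute_vector.append(flag)
--     record = [entity]
--     record.extend(attribute_vector)
--     entity_attribute_vectors.append(record)
--   return entity_attribute_vectors
-- ===== SOURCE B (Python) =====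
-- def create_entity_attribute_vectors(entity_list, entity_attribute_list):
--     groups = {}
--     for entityid, attribute, flag in entity_attribute_list:
--         groups.setdefault(entityid, []).append(flag)
--     return [[entity] + groups.get(entity, []) for entity in entity_list]
-- ===== Notes on version B (the rewrite author's own statement) =====
-- stated objective: faster
-- what changed: B groups the flags by entityid into a dict in one pass over the attribute list and then emits each entity's record by a single lookup, instead of rescanning the whole attribute list for every entity.
import Mathlib
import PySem

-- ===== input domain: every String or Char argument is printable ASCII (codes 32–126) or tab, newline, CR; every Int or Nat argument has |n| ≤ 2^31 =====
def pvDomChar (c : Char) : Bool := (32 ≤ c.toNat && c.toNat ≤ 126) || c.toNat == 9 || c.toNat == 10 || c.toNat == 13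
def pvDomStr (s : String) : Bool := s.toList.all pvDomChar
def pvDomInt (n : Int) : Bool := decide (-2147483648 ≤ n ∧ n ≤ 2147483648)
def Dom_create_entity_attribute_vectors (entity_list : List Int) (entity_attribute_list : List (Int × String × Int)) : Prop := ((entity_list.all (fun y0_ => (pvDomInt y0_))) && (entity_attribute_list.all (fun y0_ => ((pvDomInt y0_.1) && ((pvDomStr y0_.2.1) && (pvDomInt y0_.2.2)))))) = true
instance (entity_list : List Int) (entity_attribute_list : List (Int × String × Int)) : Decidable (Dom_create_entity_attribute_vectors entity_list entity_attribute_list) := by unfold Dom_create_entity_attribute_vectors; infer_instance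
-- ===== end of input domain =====

-- B groups flags by entityid in one dict pass (O(E+A)) instead of rescanning the attribute list per entity (O(E*A)).


-- ===== PORT A =====
def create_entity_attribute_vectors (entity_list : List Int) (entity_attribute_list : List (Int × String × Int)) : List (List Int) :=
  entity_list.foldl (fun entity_attribute_vectors entity =>
    let attribute_vector :=
      entity_attribute_list.foldl (fun attribute_vector entity_attribute =>
        let entityid := entity_attribute.1
        let flag := entity_attribute.2.2
        if entity == entityid then attribute_vector ++ [flag] else attribute_vector) []
    entity_attribute_vectors ++ [entity :: attribute_vector]) []

-- ===== PORT B =====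
def create_entity_attribute_vectors_alt (entity_list : List Int) (entity_attribute_list : List (Int × String × Int)) : List (List Int) :=
  let groups :=
    entity_attribute_list.foldl
      (fun groups t => groups.modify t.1 [] (· ++ [t.2.2])) (PySem.Dict.empty : PySem.Dict Int (List Int))
  entity_list.map (fun entity => entity :: groups.getD entity [])

-- ===== PRECONDITION & SPEC =====
def Spec_create_entity_attribute_vectors (entity_list : List Int) (entity_attribute_list : List (Int × String × Int)) (out : List (List Int)) : Prop := out = create_entity_attribute_vectors_alt entity_list entity_attribute_list
instance (entity_list : List Int) (entity_attribute_list : List (Int × String × Int)) (out : List (List Int)) : Decidable (Spec_create_entity_attribute_vectors entity_list entity_attribute_list out) := by unfold Spec_create_entity_attribute_vectors; infer_instance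

-- ===== CLAIM (what is proved, stated in full; the proofs are below) =====
def Claim_equal_create_entity_attribute_vectors : Prop := ∀ (entity_list : List Int) (entity_attribute_list : List (Int × String × Int)), Dom_create_entity_attribute_vectors entity_list entity_attribute_list → Spec_create_entity_attribute_vectors entity_list entity_attribute_list (create_entity_attribute_vectors entity_list entity_attribute_list)

-- ===== LEMMAS AND PROOFS =====

-- ===== VERDICT (by name: the statement is the Claim_ definition above) =====
lemma alt_groups_getD (al : List (Int × String × Int)) (e : Int) :
    (al.foldl (fun groups t => groups.modify t.1 [] (· ++ [t.2.2]))
        (PySem.Dict.empty : PySem.Dict Int (List Int))).getD e []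
      = (al.filter (fun t => t.1 == e)).map (fun t => t.2.2) := by
  have h := PySem.Dict.getD_foldl_modify_append
    (al.map (fun t : Int × String × Int => (t.1, t.2.2))) (PySem.Dict.empty) e
  simpa [List.foldl_map, List.filter_map, List.map_map, Function.comp_def] using h

theorem create_entity_attribute_vectors_spec : Claim_equal_create_entity_attribute_vectors := by
  intro el al _
  unfold Spec_create_entity_attribute_vectors create_entity_attribute_vectors
    create_entity_attribute_vectors_alt
  rw [PySem.List.foldl_append_singleton_eq_map
      (fun entity => entity :: List.foldl _ [] al) el []]
  simp only [List.nil_append]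
  refine List.map_congr_left fun e _ => ?_
  rw [alt_groups_getD, PySem.List.foldl_append_if (fun t => e == t.1) (fun t => t.2.2) al []]
  simp [BEq.comm]
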